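-- pv_equiv track=rewrite | github.com/catoteig/knowitJulekalender2019 | knowitjulekalender/luke_8/luke_8.py | pluss1tilpar
-- ===== SOURCE A (Python) =====
-- def pluss1tilpar(inn):
--     temp = str(inn)
--     result = ''
--     for s in range(0, len(temp)):
--         if temp[s] == '-':
--             result += temp[s]
--         elif int(temp[s]) % 2 == 0:
--             result += str(int(temp[s]) + 1)
--         else:
--             result += str(temp[s])
--     return int(result)
-- ===== SOURCE B (Python) =====
-- def _bumped(m):
--     # decimal digits of m (m >= 0), most significant first, with every even
--     # digit incremented arithmetically: d + 1 - d % 2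
--     d = m % 10
--     piece = str(d + 1 - d % 2)
--     return piece if m < 10 else _bumped(m // 10) + piece
--
--
-- def pluss1tilpar(inn):
--     s = _bumped(abs(inn))
--     return int('-' + s if inn < 0 else s)
-- ===== Notes on version B (the rewrite author's own statement) =====
-- stated objective: alternative
-- what changed: Replaced A's scan of str(inn) with per-character if/elif branches and string concatenation by a recursion on the number itself: digits are extracted arithmetically with divmod, each digit is bumped by the arithmetic formula d + 1 - d % 2 (no branching, no character tests), and the sign is handled once at the top.
import Mathlib
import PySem

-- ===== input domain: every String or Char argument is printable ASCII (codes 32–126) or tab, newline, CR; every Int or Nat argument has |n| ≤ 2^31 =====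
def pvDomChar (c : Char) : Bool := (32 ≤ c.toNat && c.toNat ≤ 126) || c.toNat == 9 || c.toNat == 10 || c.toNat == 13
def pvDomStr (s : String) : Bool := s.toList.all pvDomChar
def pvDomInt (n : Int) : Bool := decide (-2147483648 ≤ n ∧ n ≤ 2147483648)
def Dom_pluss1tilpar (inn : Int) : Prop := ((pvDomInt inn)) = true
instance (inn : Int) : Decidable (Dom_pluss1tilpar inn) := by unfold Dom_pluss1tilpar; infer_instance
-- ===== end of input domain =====

-- B replaces A's per-character scan of str(inn) by an arithmetic recursion on the number:
-- digits come from divmod, each is bumped by d + 1 - d % 2 (objective: alternative; no speed claim).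

-- ===== PORT A =====
-- The piece A's loop body appends to `result` for the character temp[s]
-- (branches in A's order; int(temp[s]) is PySem.Int.ofChars? — its `.getD 0` is never
-- hit, since that branch only sees digit characters of str(inn)).
def pvPieceA (c : Char) : List Char :=
  if c = '-' then [c]
  else if PySem.Int.mod ((PySem.Int.ofChars? [c]).getD 0) 2 = 0 then
    PySem.Int.toChars ((PySem.Int.ofChars? [c]).getD 0 + 1)
  else [c]

def pluss1tilpar (inn : Int) : Int :=
  let temp := PySem.Int.toChars inn
  let result := (PySem.List.pyRange 0 (temp.length : Int) 1).foldl
    (fun acc s => acc ++ pvPieceA (PySem.List.pyGetD temp s ' ')) ([] : List Char)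
  (PySem.Int.ofChars? result).getD 0

-- ===== PORT B =====
-- _bumped(m): recursion on the number; m is always abs(inn) or a quotient of it, so it
-- is nonnegative and Nat's % / // here are exact for Python's (d + 1 - d % 2 never
-- underflows since d % 2 ≤ d + 1); str(d + 1 - d % 2) is PySem.Int.toChars.
def pvBumped (m : Nat) : List Char :=
  let d := m % 10
  let piece := PySem.Int.toChars ((d : Int) + 1 - (d : Int) % 2)
  if m < 10 then piece else pvBumped (m / 10) ++ piece
decreasing_by exact Nat.div_lt_self (by omega) (by omega)

-- int('-' + s if inn < 0 else s) with s = _bumped(abs(inn))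
def pluss1tilpar_alt (inn : Int) : Int :=
  let s := pvBumped inn.natAbs
  (PySem.Int.ofChars? (if inn < 0 then '-' :: s else s)).getD 0

-- ===== PRECONDITION & SPEC =====
def Spec_pluss1tilpar (inn : Int) (out : Int) : Prop := out = pluss1tilpar_alt inn
instance (inn : Int) (out : Int) : Decidable (Spec_pluss1tilpar inn out) := by unfold Spec_pluss1tilpar; infer_instance

-- ===== CLAIM (what is proved, stated in full; the proofs are below) =====
def Claim_equal_pluss1tilpar : Prop := ∀ (inn : Int), Dom_pluss1tilpar inn → Spec_pluss1tilpar inn (pluss1tilpar inn)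

-- ===== LEMMAS AND PROOFS =====
-- What A's piece does to a single character of str(inn), as a plain function
def pvBump (c : Char) : Char :=
  if c = '0' then '1' else if c = '2' then '3' else if c = '4' then '5'
  else if c = '6' then '7' else if c = '8' then '9' else c

def pvDigits : List Char := ['0', '1', '2', '3', '4', '5', '6', '7', '8', '9']

lemma pv_digitChar_mem (n : Nat) : Nat.digitChar (n % 10) ∈ pvDigits := by
  have h : n % 10 < 10 := Nat.mod_lt _ (by norm_num)
  interval_cases h' : n % 10 <;> decide

lemma pv_mem_toDigitsCore :
    ∀ (f n : Nat) (acc : List Char) (c : Char),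
      c ∈ Nat.toDigitsCore 10 f n acc → c ∈ acc ∨ c ∈ pvDigits := by
  intro f
  induction f with
  | zero => intro n acc c h; exact Or.inl h
  | succ f ih =>
    intro n acc c h
    rw [Nat.toDigitsCore] at h
    by_cases h10 : n / 10 = 0
    · simp only [h10, if_pos] at h
      rcases List.mem_cons.mp h with h | h
      · exact Or.inr (h ▸ pv_digitChar_mem n)
      · exact Or.inl h
    · simp only [h10, if_false] at h
      rcases ih _ _ _ h with h | h
      · rcases List.mem_cons.mp h with h | h
        · exact Or.inr (h ▸ pv_digitChar_mem n)
        · exact Or.inl h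
      · exact Or.inr h

lemma pv_mem_toChars (n : Int) (c : Char) (h : c ∈ PySem.Int.toChars n) :
    c = '-' ∨ c ∈ pvDigits := by
  unfold PySem.Int.toChars at h
  split at h
  · rcases List.mem_cons.mp h with h | h
    · exact Or.inl h
    · rcases pv_mem_toDigitsCore _ _ _ _ h with h | h
      · exact absurd h (List.not_mem_nil)
      · exact Or.inr h
  · rcases pv_mem_toDigitsCore _ _ _ _ h with h | h
    · exact absurd h (List.not_mem_nil)
    · exact Or.inr h

lemma pv_piece_eq_bump (c : Char) (h : c = '-' ∨ c ∈ pvDigits) :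
    pvPieceA c = [pvBump c] := by
  rcases h with rfl | h
  · decide
  · fin_cases h <;> decide

-- mapping A's bump over the decimal digits of m gives exactly B's recursive string
lemma pv_map_bump_toDigits : ∀ m : Nat, (Nat.toDigits 10 m).map pvBump = pvBumped m := by
  intro m
  induction m using Nat.strong_induction_on with
  | _ m ih =>
    rw [Nat.toDigits_eq_if (by norm_num), pvBumped]
    by_cases h : m < 10
    · simp only [h, if_pos]
      have hm : m % 10 = m := Nat.mod_eq_of_lt h
      rw [hm]
      interval_cases m <;> decide
    · simp only [h, if_false, List.map_append,
        ih (m / 10) (Nat.div_lt_self (by omega) (by omega))]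
      congr 1
      have h10 : m % 10 < 10 := Nat.mod_lt _ (by norm_num)
      interval_cases hd : m % 10 <;> decide

theorem pluss1tilpar_spec : Claim_equal_pluss1tilpar := by
  intro inn _
  simp only [Spec_pluss1tilpar, pluss1tilpar, pluss1tilpar_alt]
  rw [PySem.List.foldl_pyRange_zero_pyGetD' (PySem.Int.toChars inn) ' '
        (fun acc c => acc ++ pvPieceA c) []]
  have h2 : List.foldl (fun acc c => acc ++ pvPieceA c) [] (PySem.Int.toChars inn)
      = List.foldl (fun acc c => acc ++ [pvBump c]) [] (PySem.Int.toChars inn) :=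
    PySem.List.foldl_congr_mem _ _ _ _
      (fun acc x hx => by rw [pv_piece_eq_bump x (pv_mem_toChars inn x hx)])
  rw [h2, PySem.List.foldl_append_singleton_eq_map, List.nil_append]
  congr 1
  unfold PySem.Int.toChars
  by_cases hneg : inn < 0
  · simp only [hneg, if_pos, List.map_cons, pv_map_bump_toDigits]
    rfl
  · simp only [hneg, if_false, pv_map_bump_toDigits]
    have h3 : inn.toNat = inn.natAbs := by omega
    rw [h3]
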